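-- pv_equiv track=rewrite | github.com/ditiz/dev-challenge | python/9.py | get_format_number
-- ===== SOURCE A (Python) =====
-- def get_format_number(array_number):
--     string_num = ''
--
--     new = 0
--     for num in array_number:
--         if new == 2:
--             string_num = string_num + ' '
--             new = 0
--         string_num = string_num + str(num)
--         new += 1
--
--     return string_num
-- ===== SOURCE B (Python) =====
-- def get_format_number(array_number):
--     arr = list(array_number)
--     pairs = [''.join(str(n) for n in arr[i:i + 2])
--              for i in range(0, len(arr), 2)]
--     return ' '.join(pairs)
-- ===== Notes on version B (the rewrite author's own statement) =====
-- stated objective: idiomatic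
-- what changed: Replaces A's running element counter that injects separator spaces mid-stream with explicit grouping into two-element slices followed by a single ' '.join over the pair-strings.
import Mathlib
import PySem

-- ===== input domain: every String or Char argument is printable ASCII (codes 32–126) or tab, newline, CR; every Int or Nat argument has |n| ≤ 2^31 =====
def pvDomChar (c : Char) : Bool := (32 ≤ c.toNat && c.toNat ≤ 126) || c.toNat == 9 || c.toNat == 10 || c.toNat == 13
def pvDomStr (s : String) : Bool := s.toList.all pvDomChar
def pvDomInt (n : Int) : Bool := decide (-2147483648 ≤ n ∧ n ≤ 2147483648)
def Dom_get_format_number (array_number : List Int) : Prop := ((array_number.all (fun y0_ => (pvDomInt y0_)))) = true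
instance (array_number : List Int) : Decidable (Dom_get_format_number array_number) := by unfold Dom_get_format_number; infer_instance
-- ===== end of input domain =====

-- B replaces A's running counter that injects spaces mid-stream by grouping the list
-- into two-element slices and joining the pair-strings with ' ' (different decomposition).

-- ===== PORT A =====
-- Python strings are built as List Char (PySem convention), wrapped with String.ofList at the end.
def get_format_number (array_number : List Int) : String :=
  String.ofList
    ((array_number.foldl
        (fun (st : List Char × Int) num =>
          let st' := if st.2 = 2 then (st.1 ++ [' '], (0 : Int)) else st
          (st'.1 ++ PySem.Int.toChars num, st'.2 + 1))
        ([], 0)).1)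

-- ===== PORT B =====
def get_format_number_alt (array_number : List Int) : String :=
  let arr := array_number
  let pairs := (PySem.List.pyRange 0 (arr.length : Int) 2).map
    (fun i => PySem.Chars.join [] ((PySem.List.slice arr (some i) (some (i + 2))).map PySem.Int.toChars))
  String.ofList (PySem.Chars.join [' '] pairs)

-- ===== PRECONDITION & SPEC =====
def Spec_get_format_number (array_number : List Int) (out : String) : Prop := out = get_format_number_alt array_number
instance (array_number : List Int) (out : String) : Decidable (Spec_get_format_number array_number out) := by unfold Spec_get_format_number; infer_instance

-- ===== CLAIM (what is proved, stated in full; the proofs are below) =====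
def Claim_equal_get_format_number : Prop := ∀ (array_number : List Int), Dom_get_format_number array_number → Spec_get_format_number array_number (get_format_number array_number)

-- ===== LEMMAS AND PROOFS =====

-- the pair-strings both programs produce: group the numbers two by two
def pairsOf : List Int → List (List Char)
  | [] => []
  | [a] => [PySem.Int.toChars a]
  | a :: b :: rest => (PySem.Int.toChars a ++ PySem.Int.toChars b) :: pairsOf rest

lemma pyRange2_cons (m : Nat) :
    PySem.List.pyRange 0 ((m : Int) + 2) 2 =
      0 :: (PySem.List.pyRange 0 (m : Int) 2).map (· + 2) := by
  rw [PySem.List.pyRange_of_pos _ _ (by norm_num), PySem.List.pyRange_of_pos _ _ (by norm_num)]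
  have h2 : ((((m : Int) + 2) - 0 + 2 - 1) / 2).toNat =
      (if (0:Int) < m then (((m : Int) - 0 + 2 - 1) / 2).toNat else 0) + 1 := by
    split_ifs with h
    · omega
    · omega
  simp only [if_pos (by omega : (0:Int) < (m : Int) + 2)]
  rw [h2, List.range_succ_eq_map]
  simp [List.map_map, Function.comp]
  intro a _; ring

lemma alt_eq_pairsOf : ∀ l : List Int,
    (PySem.List.pyRange 0 (l.length : Int) 2).map
      (fun i => PySem.Chars.join [] ((PySem.List.slice l (some i) (some (i + 2))).map PySem.Int.toChars))
      = pairsOf l := by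
  intro l
  induction l using pairsOf.induct with
  | case1 => simp [pairsOf, PySem.List.pyRange_of_pos]
  | case2 a =>
      simp [pairsOf, PySem.List.pyRange_of_pos, PySem.List.slice,
            PySem.Chars.join_singleton]
  | case3 a b rest ih =>
      have hlen : ((a :: b :: rest).length : Int) = (rest.length : Int) + 2 := by
        simp; ring
      rw [hlen, pyRange2_cons]
      simp only [List.map_cons, List.map_map]
      rw [pairsOf]
      congr 1
      · have : PySem.List.slice (a :: b :: rest) (some (0:Int)) (some ((0:Int) + 2))
            = [a, b] := by
          rw [show ((0:Int) = ((0:Nat):Int)) by norm_num,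
              show (((0:Nat):Int) + 2) = (((0:Nat):Int) + ((2:Nat):Int)) by norm_num,
              PySem.List.slice_natCast_add]
          simp
        rw [this]
        simp [PySem.Chars.join_cons_cons, PySem.Chars.join_singleton]
      · rw [← ih]
        apply List.map_congr_left
        intro i hi
        have h0 : 0 ≤ i := ((PySem.List.mem_pyRange_iff_of_pos (by norm_num : (0:Int) < 2) i).1 hi).1
        obtain ⟨j, rfl⟩ : ∃ j : Nat, i = (j : Int) := ⟨i.toNat, (Int.toNat_of_nonneg h0).symm⟩
        simp only [Function.comp_apply]
        have e1 : PySem.List.slice (a :: b :: rest) (some ((j:Int) + 2)) (some ((j:Int) + 2 + 2))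
            = List.take 2 (List.drop (j + 2) (a :: b :: rest)) := by
          rw [show ((j:Int) + 2) = ((j + 2 : Nat) : Int) by push_cast; ring,
              show (((j + 2 : Nat) : Int) + 2) = (((j + 2 : Nat) : Int) + ((2:Nat):Int)) by norm_num,
              PySem.List.slice_natCast_add]
        have e2 : PySem.List.slice rest (some (j:Int)) (some ((j:Int) + 2))
            = List.take 2 (List.drop j rest) := by
          rw [show ((j:Int) + 2) = ((j:Int) + ((2:Nat):Int)) by norm_num,
              PySem.List.slice_natCast_add]
        rw [e1, e2, show j + 2 = (j+1)+1 by ring]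
        simp [List.drop_succ_cons]

-- A's loop body, named so the lemmas can speak about it (definitionally A's lambda)
def stepA (st : List Char × Int) (num : Int) : List Char × Int :=
  let st' := if st.2 = 2 then (st.1 ++ [' '], (0 : Int)) else st
  (st'.1 ++ PySem.Int.toChars num, st'.2 + 1)

lemma foldA_two (acc : List Char) (l : List Int) (h : l ≠ []) :
    l.foldl stepA (acc, 2) = l.foldl stepA (acc ++ [' '], 0) := by
  cases l with
  | nil => exact absurd rfl h
  | cons x xs => simp [stepA]

lemma foldA_eq : ∀ (l : List Int) (acc : List Char),
    (l.foldl stepA (acc, 0)).1 = acc ++ PySem.Chars.join [' '] (pairsOf l) := by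
  intro l
  induction l using pairsOf.induct with
  | case1 => intro acc; simp [pairsOf, PySem.Chars.join_nil]
  | case2 a => intro acc; simp [pairsOf, stepA, PySem.Chars.join_singleton]
  | case3 a b rest ih =>
      intro acc
      have h2 : List.foldl stepA (acc, 0) (a :: b :: rest)
          = List.foldl stepA (acc ++ PySem.Int.toChars a ++ PySem.Int.toChars b, 2) rest := by
        simp [stepA]
      rw [h2]
      cases rest with
      | nil =>
          simp [pairsOf, PySem.Chars.join_singleton]
      | cons c cs =>
          rw [foldA_two _ _ (by simp), ih]
          obtain ⟨q, qs, hq⟩ : ∃ q qs, pairsOf (c :: cs) = q :: qs := by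
            cases cs <;> simp [pairsOf]
          rw [pairsOf, hq, PySem.Chars.join_cons_cons, ← hq]
          simp

-- ===== VERDICT (by name: the statement is the Claim_ definition above) =====
theorem get_format_number_spec : Claim_equal_get_format_number := by
  intro l _
  unfold Spec_get_format_number
  have hA : get_format_number l = String.ofList ((l.foldl stepA ([], 0)).1) := rfl
  rw [hA, foldA_eq, List.nil_append]
  show _ = String.ofList (PySem.Chars.join [' ']
    ((PySem.List.pyRange 0 (l.length : Int) 2).map
      (fun i => PySem.Chars.join [] ((PySem.List.slice l (some i) (some (i + 2))).map PySem.Int.toChars))))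
  rw [alt_eq_pairsOf]
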